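-- pv_equiv track=rewrite | github.com/LucasLudueno/simulacion-tp | tp1/e9.py | gaps_out_inteval
-- ===== SOURCE A (Python) =====
-- def gaps_out_inteval(start, end, numbers_list):
--  gaps_list = []
--  gaps_count = 0
--
--  is_out_interval = False
--  for number in numbers_list:
--     if number < start or number > end:
--       gaps_count += 1
--       is_out_interval = True
--     else:
--       if is_out_interval:
--         gaps_list.append(gaps_count)
--       gaps_count = 0
--       is_out_interval = False
--
--  if is_out_interval:
--    gaps_list.append(gaps_count)
--
--  return gaps_list
-- ===== SOURCE B (Python) =====
-- def gaps_out_inteval(start, end, numbers_list):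
--     # two-pointer run scan: jump over each maximal out-of-interval run at once
--     gaps = []
--     i = 0
--     n = len(numbers_list)
--     while i < n:
--         if numbers_list[i] < start or numbers_list[i] > end:
--             j = i
--             while j < n and (numbers_list[j] < start or numbers_list[j] > end):
--                 j += 1
--             gaps.append(j - i)
--             i = j
--         else:
--             i += 1
--     return gaps
-- ===== Notes on version B (the rewrite author's own statement) =====
-- stated objective: alternative
-- what changed: Replaced the flag-and-counter accumulator loop (with a post-loop flush) by a two-pointer scan that finds each maximal out-of-interval run and appends its length directly, so no running state or final flush is needed.
import Mathlib
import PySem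

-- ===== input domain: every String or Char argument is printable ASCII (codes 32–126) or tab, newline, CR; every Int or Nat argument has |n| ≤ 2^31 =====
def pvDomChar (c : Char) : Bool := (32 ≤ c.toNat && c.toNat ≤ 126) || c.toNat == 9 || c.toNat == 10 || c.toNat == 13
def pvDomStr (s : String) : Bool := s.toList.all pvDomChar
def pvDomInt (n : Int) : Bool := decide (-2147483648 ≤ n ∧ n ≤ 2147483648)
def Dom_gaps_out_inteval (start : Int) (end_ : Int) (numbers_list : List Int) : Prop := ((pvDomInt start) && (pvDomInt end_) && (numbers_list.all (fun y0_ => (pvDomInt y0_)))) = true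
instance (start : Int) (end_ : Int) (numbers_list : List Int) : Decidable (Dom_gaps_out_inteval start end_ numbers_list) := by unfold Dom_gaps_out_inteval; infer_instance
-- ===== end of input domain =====

-- B replaces A's flag-and-counter loop (with post-loop flush) by a two-pointer run scan; alternative decomposition, same cost, return value equal.

-- ===== PORT A =====
-- literal transliteration: fold over the list carrying (gaps_list, gaps_count, is_out_interval), then the post-loop flush
def gaps_out_inteval (start : Int) (end_ : Int) (numbers_list : List Int) : List Int :=
  let st := numbers_list.foldl
    (fun (s : List Int × Int × Bool) number =>
      if number < start || number > end_ then
        (s.1, s.2.1 + 1, true)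
      else
        ((if s.2.2 then s.1 ++ [s.2.1] else s.1), 0, false))
    ([], 0, false)
  if st.2.2 then st.1 ++ [st.2.1] else st.1

-- ===== PORT B =====
-- the inner while loop 'advance j over the run' is takeWhile/dropWhile on the suffix; 'i = j' is recursing on the dropped suffix
def gapsAltGo (p : Int → Bool) : List Int → List Int
  | [] => []
  | x :: xs =>
    if p x then
      (((x :: xs).takeWhile p).length : Int) :: gapsAltGo p ((x :: xs).dropWhile p)
    else
      gapsAltGo p xs
termination_by l => l.length
decreasing_by
  · simp only [List.dropWhile_cons, *]
    exact Nat.lt_succ_of_le (List.length_dropWhile_le p xs)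
  · simp

def gaps_out_inteval_alt (start : Int) (end_ : Int) (numbers_list : List Int) : List Int :=
  gapsAltGo (fun n => n < start || n > end_) numbers_list

-- ===== PRECONDITION & SPEC =====
def Spec_gaps_out_inteval (start : Int) (end_ : Int) (numbers_list : List Int) (out : List Int) : Prop := out = gaps_out_inteval_alt start end_ numbers_list
instance (start : Int) (end_ : Int) (numbers_list : List Int) (out : List Int) : Decidable (Spec_gaps_out_inteval start end_ numbers_list out) := by unfold Spec_gaps_out_inteval; infer_instance

-- ===== CLAIM (what is proved, stated in full; the proofs are below) =====
def Claim_equal_gaps_out_inteval : Prop := ∀ (start : Int) (end_ : Int) (numbers_list : List Int), Dom_gaps_out_inteval start end_ numbers_list → Spec_gaps_out_inteval start end_ numbers_list (gaps_out_inteval start end_ numbers_list)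

-- ===== LEMMAS AND PROOFS =====

-- proof-side reformulation of A's loop: the remaining list together with the current counter/flag
def gapsGoA (p : Int → Bool) : List Int → Int → Bool → List Int
  | [], cnt, flag => if flag then [cnt] else []
  | x :: xs, cnt, flag =>
    if p x then gapsGoA p xs (cnt + 1) true
    else (if flag then [cnt] else []) ++ gapsGoA p xs 0 false

theorem gapsGoA_spec (p : Int → Bool) :
    ∀ (l : List Int) (acc : List Int) (cnt : Int) (flag : Bool),
    (let st := l.foldl
        (fun (s : List Int × Int × Bool) number =>
          if p number then (s.1, s.2.1 + 1, true)
          else ((if s.2.2 then s.1 ++ [s.2.1] else s.1), 0, false)) (acc, cnt, flag)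
      if st.2.2 then st.1 ++ [st.2.1] else st.1) = acc ++ gapsGoA p l cnt flag := by
  intro l
  induction l with
  | nil => intro acc cnt flag; simp [gapsGoA]; split <;> simp
  | cons x xs ih =>
    intro acc cnt flag
    simp only [List.foldl_cons, gapsGoA]
    by_cases h : p x
    · simpa [h] using ih acc (cnt + 1) true
    · by_cases hf : flag
      · simpa [h, hf] using ih (acc ++ [cnt]) 0 false
      · simpa [h, hf] using ih acc 0 false

theorem gapsGoA_true (p : Int → Bool) :
    ∀ (xs : List Int) (cnt : Int),
    gapsGoA p xs cnt true = (cnt + ((xs.takeWhile p).length : Int)) :: gapsGoA p (xs.dropWhile p) 0 false := by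
  intro xs
  induction xs with
  | nil => intro cnt; simp [gapsGoA]
  | cons y ys ih =>
    intro cnt
    by_cases h : p y
    · simp only [gapsGoA, h, if_pos, List.takeWhile_cons, List.dropWhile_cons]
      rw [ih (cnt + 1)]
      simp
      ring
    · simp [gapsGoA, h]

theorem gapsGoA_eq_altGo (p : Int → Bool) : ∀ (l : List Int), gapsGoA p l 0 false = gapsAltGo p l
  | [] => by simp [gapsGoA, gapsAltGo]
  | x :: xs => by
    by_cases h : p x
    · rw [gapsAltGo]
      simp only [gapsGoA, h, if_true, List.takeWhile_cons, List.dropWhile_cons]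
      rw [gapsGoA_true, gapsGoA_eq_altGo p (xs.dropWhile p)]
      simp
      omega
    · rw [gapsAltGo]
      simp only [gapsGoA, h, Bool.false_eq_true, if_false, List.nil_append]
      exact gapsGoA_eq_altGo p xs
termination_by l => l.length
decreasing_by
  · exact Nat.lt_succ_of_le (List.length_dropWhile_le p xs)
  · simp

-- ===== VERDICT (by name: the statement is the Claim_ definition above) =====
theorem gaps_out_inteval_spec : Claim_equal_gaps_out_inteval := by
  intro start end_ numbers_list _
  unfold Spec_gaps_out_inteval gaps_out_inteval gaps_out_inteval_alt
  rw [gapsGoA_spec (fun n => n < start || n > end_) numbers_list [] 0 false]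
  simp [gapsGoA_eq_altGo]
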